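-- pv_equiv track=rewrite | github.com/WebProject-STT/Algorithm | baekjoon/9주차/13549/13549_sb.py | solution
-- ===== SOURCE A (Python) =====
-- from collections import deque
--
-- def solution(N, K) :
--     limit = 100001 # 최대로 주어지는 점 + 1
--     time = [-1] * limit # 시간 저장을 위한 리스트 (방문 여부 확인을 위해 -1로 초기화)
--     time[N] = 0 # 시작은 0초
--     d = [2, -1, 1]
--
--     q = deque()
--     q.append(N)
--
--     while q :
--         X = q.popleft()
--         if X == K :
--             return time[X]
--         for i in range(3) :
--             if i == 0 : # 수빈이가 순간이동하는 경우
--                 nx = X * d[i]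
--                 if 0 < nx < limit and time[nx] == -1:
--                     time[nx] = time[X]
--                     q.appendleft(nx)
--             else : # 수빈이가 걷는 경우
--                 nx = X + d[i]
--                 if 0 <= nx < limit and time[nx] == -1 :
--                     time[nx] = time[X] + 1
--                     q.append(nx)
-- ===== SOURCE B (Python) =====
-- def solution(N, K):
--     limit = 100001
--     time = [-1] * limit
--     time[N] = 0
--     queue = [N]          # grow-only FIFO of chain entry points
--     head = 0
--     while head < len(queue):
--         v = queue[head]
--         head += 1
--         while True:      # follow the 0-cost doubling chain from v eagerly
--             if v == K:
--                 return time[v]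
--             nv = 2 * v
--             follow = 0 < nv < limit and time[nv] == -1
--             if follow:
--                 time[nv] = time[v]
--             for w in (v - 1, v + 1):
--                 if 0 <= w < limit and time[w] == -1:
--                     time[w] = time[v] + 1
--                     queue.append(w)
--             if not follow:
--                 break
--             v = nv
-- ===== Notes on version B (the rewrite author's own statement) =====
-- stated objective: alternative
-- what changed: Replaces the deque-based 0-1 BFS (appendleft trick for the 0-cost teleport edges) by a plain grow-only FIFO list of chain entries plus an inner loop that follows each 0-cost doubling chain eagerly; no deque and no per-edge front/back juggling, same traversal order.
import Mathlib
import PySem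

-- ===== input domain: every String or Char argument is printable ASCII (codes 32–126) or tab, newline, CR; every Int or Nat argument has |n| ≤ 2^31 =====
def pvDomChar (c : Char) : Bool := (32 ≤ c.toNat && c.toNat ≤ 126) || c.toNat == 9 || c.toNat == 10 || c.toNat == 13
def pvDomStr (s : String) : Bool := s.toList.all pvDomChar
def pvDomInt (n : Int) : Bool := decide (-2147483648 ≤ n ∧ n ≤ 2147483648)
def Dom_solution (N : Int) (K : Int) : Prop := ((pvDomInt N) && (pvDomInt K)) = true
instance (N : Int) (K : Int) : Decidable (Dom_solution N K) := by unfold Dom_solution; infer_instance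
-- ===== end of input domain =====

-- B removes the deque of A's 0-1 BFS: a plain grow-only FIFO of chain entries plus an inner
-- loop that follows each 0-cost doubling chain eagerly; same traversal, proved by lockstep
-- bisimulation of the two queue disciplines (objective: alternative decomposition).


-- Shared Python-list semantics for the `time` array of length 100001:
-- Python's negative indices wrap (`time[i]` = `time[i+100001]` for -100001 ≤ i < 0); exact on
-- that range, which covers every read/write either program performs on admitted inputs.
def pyIdx (i : Int) : Nat := (if i < 0 then i + 100001 else i).toNat

def tGet (t : Array Int) (i : Int) : Int := t.getD (pyIdx i) 0

def tSet (t : Array Int) (i : Int) (v : Int) : Array Int := t.setIfInBounds (pyIdx i) v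

-- Shared FIFO-front pop on a two-list queue representation (front, reversed back);
-- the abstract queue is `f ++ b.reverse`.
def quePop (f b : List Int) : Option (Int × List Int × List Int) :=
  match f with
  | h :: t => some (h, t, b)
  | [] =>
    match b.reverse with
    | [] => none
    | h :: t => some (h, t, [])

-- ===== PORT A =====
-- A's `while q` loop; the deque is the two-list pair (qf, qb): popleft = quePop, appendleft =
-- cons onto qf, append = cons onto qb.  The fuel only makes the loop total (each iteration
-- pops one element and every push first marks an unmarked cell, so it is never exhausted on
-- inputs the claim admits); when it runs out (or the deque empties: Python returns None) the
-- result is the sentinel -1, outside Pre_solution.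
def aLoop : Nat → Array Int → List Int → List Int → Int → Int
  | 0, _, _, _, _ => -1
  | fuel + 1, time, qf, qb, K =>
    match quePop qf qb with
    | none => -1
    | some (X, qf1, qb1) =>
      if X = K then tGet time X
      else
        -- i = 0 : teleport, nx = X * d[0]
        let nx0 := X * 2
        let s0 : Array Int × List Int :=
          if 0 < nx0 ∧ nx0 < 100001 ∧ tGet time nx0 = -1 then
            (tSet time nx0 (tGet time X), nx0 :: qf1)
          else (time, qf1)
        -- i = 1 : walk, nx = X + d[1]
        let nx1 := X + (-1)
        let s1 : Array Int × List Int :=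
          if 0 ≤ nx1 ∧ nx1 < 100001 ∧ tGet s0.1 nx1 = -1 then
            (tSet s0.1 nx1 (tGet s0.1 X + 1), nx1 :: qb1)
          else (s0.1, qb1)
        -- i = 2 : walk, nx = X + d[2]
        let nx2 := X + 1
        let s2 : Array Int × List Int :=
          if 0 ≤ nx2 ∧ nx2 < 100001 ∧ tGet s1.1 nx2 = -1 then
            (tSet s1.1 nx2 (tGet s1.1 X + 1), nx2 :: s1.2)
          else (s1.1, s1.2)
        aLoop fuel s2.1 s0.2 s2.2 K

def solution (N : Int) (K : Int) : Int :=
  aLoop 200005 (tSet (Array.replicate 100001 (-1)) N 0) [N] [] K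

-- ===== PORT B =====
-- Source B's nested loops: the state is the current chain node v plus the FIFO `queue[head:]`
-- (two-list pair rem/back, append = cons onto back).  The `follow` recursion is the inner
-- `while True` chain walk, the quePop branch is the next outer iteration; the initial call
-- is the first outer pop (queue = [N]).  Fuel as in port A: totality guard only.
def bStep : Nat → Array Int → Int → List Int → List Int → Int → Int
  | 0, _, _, _, _, _ => -1
  | fuel + 1, time, v, rem, back, K =>
    if v = K then tGet time v
    else
      let nv := 2 * v
      let follow := 0 < nv ∧ nv < 100001 ∧ tGet time nv = -1
      let time1 := if follow then tSet time nv (tGet time v) else time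
      let s1 : Array Int × List Int :=
        if 0 ≤ v - 1 ∧ v - 1 < 100001 ∧ tGet time1 (v - 1) = -1 then
          (tSet time1 (v - 1) (tGet time1 v + 1), (v - 1) :: back)
        else (time1, back)
      let s2 : Array Int × List Int :=
        if 0 ≤ v + 1 ∧ v + 1 < 100001 ∧ tGet s1.1 (v + 1) = -1 then
          (tSet s1.1 (v + 1) (tGet s1.1 v + 1), (v + 1) :: s1.2)
        else (s1.1, s1.2)
      if follow then bStep fuel s2.1 nv rem s2.2 K
      else
        match quePop rem s2.2 with
        | none => -1
        | some (w, rem1, back1) => bStep fuel s2.1 w rem1 back1 K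

def solution_alt (N : Int) (K : Int) : Int :=
  bStep 200005 (tSet (Array.replicate 100001 (-1)) N 0) N [] [] K

-- ===== PRECONDITION & SPEC =====
-- Exactly the inputs on which Python's A returns an int: for N outside [-100001, 100000] it
-- raises IndexError, for K it never pops it falls off the loop and returns None (not an int);
-- for N = -1 Python's negative indexing aliases cell 100000 as already visited, so K = 100000
-- is also a None case there.  (Negative N with K = N returns 0 via the same wraparound and is
-- kept inside Pre_; both programs agree there.)
def Pre_solution (N : Int) (K : Int) : Prop :=
  (-100001 ≤ N ∧ N ≤ 100000) ∧
    (K = N ∨ (-1 ≤ N ∧ 0 ≤ K ∧ K ≤ 100000 ∧ ¬(N = -1 ∧ K = 100000)))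
instance (N : Int) (K : Int) : Decidable (Pre_solution N K) := by
  unfold Pre_solution; infer_instance

def pvWitness_solution : Int × Int := (3, 7)

def Spec_solution (N : Int) (K : Int) (out : Int) : Prop := out = solution_alt N K
instance (N : Int) (K : Int) (out : Int) : Decidable (Spec_solution N K out) := by
  unfold Spec_solution; infer_instance

-- ===== CLAIM (what is proved, stated in full; the proofs are below) =====
def Claim_equal_solution : Prop :=
  ∀ (N : Int) (K : Int), Dom_solution N K → Pre_solution N K → Spec_solution N K (solution N K)

-- ===== LEMMAS AND PROOFS =====

theorem quePop_abs_nil (f b : List Int) (h : f ++ b.reverse = []) : quePop f b = none := by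
  rcases List.append_eq_nil_iff.mp h with ⟨hf, hb⟩
  subst hf
  simp only [quePop, hb]

theorem quePop_abs_cons (f b : List Int) (x : Int) (xs : List Int)
    (h : f ++ b.reverse = x :: xs) :
    ∃ f1 b1, quePop f b = some (x, f1, b1) ∧ f1 ++ b1.reverse = xs := by
  cases f with
  | cons h' t =>
    simp only [List.cons_append, List.cons.injEq] at h
    exact ⟨t, b, by simp [quePop, h.1], h.2⟩
  | nil =>
    simp only [List.nil_append] at h
    exact ⟨xs, [], by simp [quePop, h], by simp⟩

theorem aLoop_nil (fuel : Nat) (time : Array Int) (qf qb : List Int) (K : Int)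
    (h : qf ++ qb.reverse = []) : aLoop fuel time qf qb K = -1 := by
  cases fuel with
  | zero => simp [aLoop]
  | succ f => simp [aLoop, quePop_abs_nil qf qb h]

-- The lockstep bisimulation: A's deque, read abstractly, is always the current chain node
-- followed by B's pending FIFO, and both bodies perform the same marks in the same order.
theorem lockstep :
    ∀ (fuel : Nat) (time : Array Int) (v : Int) (qf qb rem back : List Int) (K : Int),
      qf ++ qb.reverse = v :: (rem ++ back.reverse) →
      aLoop fuel time qf qb K = bStep fuel time v rem back K := by
  intro fuel
  induction fuel with
  | zero => intro time v qf qb rem back K h; rfl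
  | succ f ih =>
    intro time v qf qb rem back K h
    obtain ⟨qf1, qb1, hpop, habs⟩ := quePop_abs_cons _ _ _ _ h
    have dispatch : ∀ (T : Array Int) (qfa qba remb backb : List Int),
        qfa ++ qba.reverse = remb ++ backb.reverse →
        aLoop f T qfa qba K = (match quePop remb backb with
          | none => -1
          | some (w, rem1, back1) => bStep f T w rem1 back1 K) := by
      intro T qfa qba remb backb habs2
      cases hl : remb ++ backb.reverse with
      | nil =>
        rw [quePop_abs_nil _ _ hl]
        exact aLoop_nil _ _ _ _ _ (habs2.trans hl)
      | cons w rest =>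
        obtain ⟨r1, b1, hp2, ha2⟩ := quePop_abs_cons _ _ _ _ hl
        rw [hp2]
        exact ih T w qfa qba r1 b1 K (by rw [habs2, hl, ← ha2])
    simp only [aLoop, bStep, hpop]
    by_cases hK : v = K
    · simp [hK]
    · simp only [if_neg hK,
        show v * 2 = 2 * v from mul_comm v 2,
        show v + (-1) = v - 1 from by omega]
      split_ifs
      all_goals
        first
        | exact ih _ _ _ _ _ _ _ (by simp [List.reverse_cons, ← List.append_assoc, habs])
        | exact dispatch _ _ _ _ _ (by simp [List.reverse_cons, ← List.append_assoc, habs])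

-- ===== VERDICT (by name: the statement is the Claim_ definition above) =====
theorem solution_spec : Claim_equal_solution := by
  intro N K _ _
  unfold Spec_solution solution solution_alt
  exact lockstep 200005 _ N [N] [] [] [] K (by simp)
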